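-- pv_equiv track=rewrite | github.com/759039446/video-scenes-cut | src/main_scene_cut.py | replace_first_directory
-- ===== SOURCE A (Python) =====
-- def replace_first_directory(path, new_dir):
--     # 验证路径是否有效
--     names = path.split("\\")
--     new_path = ""
--     for index, name in enumerate(names):
--         if index == 0:
--             new_path += new_dir
--         else:
--             new_path += "\\" + name
--     return new_path
-- ===== SOURCE B (Python) =====
-- def replace_first_directory(path, new_dir):
--     idx = path.find("\\")
--     if idx == -1:
--         return new_dir
--     return new_dir + path[idx:]
-- ===== Notes on version B (the rewrite author's own statement) =====
-- stated objective: simpler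
-- what changed: B drops the split-into-components list and the rebuilding loop: it finds the first backslash with str.find and returns new_dir plus the unchanged tail slice (or just new_dir if there is no backslash).
import Mathlib
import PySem

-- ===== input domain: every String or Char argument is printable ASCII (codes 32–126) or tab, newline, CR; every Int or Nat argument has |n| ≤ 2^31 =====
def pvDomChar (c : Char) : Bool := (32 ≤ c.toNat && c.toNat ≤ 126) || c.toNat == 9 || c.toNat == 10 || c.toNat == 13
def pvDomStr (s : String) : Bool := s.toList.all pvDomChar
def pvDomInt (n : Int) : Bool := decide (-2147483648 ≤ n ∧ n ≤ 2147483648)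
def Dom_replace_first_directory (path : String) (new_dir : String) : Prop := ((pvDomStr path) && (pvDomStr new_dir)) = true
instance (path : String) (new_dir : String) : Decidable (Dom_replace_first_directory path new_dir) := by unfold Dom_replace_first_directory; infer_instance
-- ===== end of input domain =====

-- B replaces A's split-into-components + rebuilding loop by a single find of the
-- first backslash and a tail slice (objective: simpler).


-- ===== PORT A =====
-- names = path.split("\\"); loop over enumerate(names) accumulating new_path.
-- Strings are handled as List Char (exact: ASCII code points) and packed at the end.
def replace_first_directory (path : String) (new_dir : String) : String :=
  let names := PySem.Chars.splitOn path.toList ['\\']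
  let new_path := (PySem.List.enumerate names).foldl
    (fun np p => if p.1 = 0 then np ++ new_dir.toList else np ++ ('\\' :: p.2))
    ([] : List Char)
  String.ofList new_path

-- ===== PORT B =====
-- idx = path.find("\\"); return new_dir if idx == -1 else new_dir + path[idx:]
def replace_first_directory_alt (path : String) (new_dir : String) : String :=
  let idx := PySem.Str.find path "\\"
  if idx = -1 then new_dir
  else String.ofList (new_dir.toList ++ PySem.List.slice path.toList (some idx) none)

-- ===== PRECONDITION & SPEC =====
def Spec_replace_first_directory (path : String) (new_dir : String) (out : String) : Prop := out = replace_first_directory_alt path new_dir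
instance (path : String) (new_dir : String) (out : String) : Decidable (Spec_replace_first_directory path new_dir out) := by unfold Spec_replace_first_directory; infer_instance

-- ===== CLAIM (what is proved, stated in full; the proofs are below) =====
def Claim_equal_replace_first_directory : Prop := ∀ (path : String) (new_dir : String), Dom_replace_first_directory path new_dir → Spec_replace_first_directory path new_dir (replace_first_directory path new_dir)

-- ===== LEMMAS AND PROOFS =====

-- Fuel-free characterisation of split on a single backslash, used to reason about A.
def pvSplit (l : List Char) : List (List Char) :=
  match h : l.dropWhile (· ≠ '\\') with
  | [] => [l.takeWhile (· ≠ '\\')]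
  | _ :: r => l.takeWhile (· ≠ '\\') :: pvSplit r
termination_by l.length
decreasing_by
  have h1 : (l.dropWhile (· ≠ '\\')).length ≤ l.length := List.length_dropWhile_le _ _
  rw [h] at h1
  simp at h1 ⊢
  omega

theorem pvSplit_nil : pvSplit [] = [[]] := by
  rw [pvSplit]; split
  · simp
  · simp_all

theorem pvSplit_bs (rest : List Char) : pvSplit ('\\' :: rest) = [] :: pvSplit rest := by
  rw [pvSplit]; split
  · simp_all
  · rename_i x r h
    simp only [List.dropWhile_cons] at h
    simp at h
    simp [h.2]

theorem pvSplit_cons_ne (c : Char) (rest : List Char) (hc : c ≠ '\\') :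
    pvSplit (c :: rest) = (pvSplit rest).modifyHead (c :: ·) := by
  conv_lhs => rw [pvSplit]
  conv_rhs => rw [pvSplit]
  have hdw : (c :: rest).dropWhile (· ≠ '\\') = rest.dropWhile (· ≠ '\\') := by
    simp [hc]
  split
  · rename_i h
    rw [hdw] at h
    split
    · simp [hc]
    · rename_i x r heq
      rw [h] at heq
      cases heq
  · rename_i x r h
    rw [hdw] at h
    split
    · rename_i heq
      rw [heq] at h
      cases h
    · rename_i x' r' heq
      rw [heq] at h
      cases h
      simp [hc]

theorem pvSplit_head (l : List Char) :
    pvSplit l = l.takeWhile (· ≠ '\\') :: (pvSplit l).tail := by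
  rw [pvSplit]
  split <;> simp

theorem pvSplit_go_spec (n : Nat) : ∀ (l cur : List Char) (acc : List (List Char)),
    l.length < n →
    PySem.Chars.splitOn.go ['\\'] n l cur acc
      = acc.reverse ++ (pvSplit l).modifyHead (cur.reverse ++ ·) := by
  induction n with
  | zero => intro l cur acc h; omega
  | succ n ih =>
    intro l cur acc h
    match l with
    | [] =>
      rw [pvSplit_nil]
      simp [PySem.Chars.splitOn.go]
    | c :: rest =>
      by_cases hc : c = '\\'
      · subst hc
        rw [show PySem.Chars.splitOn.go ['\\'] (n+1) ('\\' :: rest) cur acc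
              = PySem.Chars.splitOn.go ['\\'] n rest [] (cur.reverse :: acc) by
            simp [PySem.Chars.splitOn.go, List.isPrefixOf]]
        rw [ih rest [] (cur.reverse :: acc) (by simp at h ⊢; omega)]
        rw [pvSplit_bs]
        cases pvSplit rest <;> simp
      · rw [show PySem.Chars.splitOn.go ['\\'] (n+1) (c :: rest) cur acc
              = PySem.Chars.splitOn.go ['\\'] n rest (c :: cur) acc by
            simp [PySem.Chars.splitOn.go, List.isPrefixOf, Ne.symm hc]]
        rw [ih rest (c :: cur) acc (by simp at h ⊢; omega)]
        rw [pvSplit_cons_ne c rest hc]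
        cases pvSplit rest <;> simp

theorem pvSplit_eq (l : List Char) :
    PySem.Chars.splitOn l ['\\'] = pvSplit l := by
  unfold PySem.Chars.splitOn
  rw [pvSplit_go_spec (l.length + 1) l [] [] (by omega)]
  cases pvSplit l <;> simp

-- joining the tail of the split back with '\\' is exactly the suffix from the first backslash
theorem pvSplit_tail_join (l : List Char) :
    ((pvSplit l).tail).flatMap (fun n => '\\' :: n) = l.dropWhile (· ≠ '\\') := by
  fun_induction pvSplit l with
  | case1 l h =>
    simp only [List.tail_cons, List.flatMap_nil]
    exact h.symm
  | case2 l x r h ih =>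
    have hx : x = '\\' := by
      have hne := List.head_dropWhile_not (p := (· ≠ '\\')) (l := l) (by rw [h]; simp)
      simp only [h, List.head_cons] at hne
      simpa using hne
    subst hx
    calc ((pvSplit r).flatMap (fun n => '\\' :: n))
        = '\\' :: (r.takeWhile (· ≠ '\\') ++ ((pvSplit r).tail).flatMap (fun n => '\\' :: n)) := by
          conv_lhs => rw [pvSplit_head r]
          simp [List.flatMap_cons]
      _ = '\\' :: r := by rw [ih]; simp [List.takeWhile_append_dropWhile]
      _ = l.dropWhile (· ≠ '\\') := h.symm

-- A's loop over enumerate(names) with indices starting at k ≥ 1 never hits the index-0 branch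
theorem pvFold_tail (d : List Char) : ∀ (t : List (List Char)) (acc : List Char) (k : Int), 1 ≤ k →
    (PySem.List.enumerate t k).foldl
      (fun np p => if p.1 = 0 then np ++ d else np ++ ('\\' :: p.2)) acc
      = acc ++ t.flatMap (fun n => '\\' :: n) := by
  intro t
  induction t with
  | nil => intro acc k _; simp [PySem.List.enumerate]
  | cons n rest ih =>
    intro acc k hk
    rw [show PySem.List.enumerate (n :: rest) k = (k, n) :: PySem.List.enumerate rest (k+1) by
        simp [PySem.List.enumerate]]
    simp only [List.foldl_cons]
    rw [if_neg (by omega)]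
    rw [ih (acc ++ ('\\' :: n)) (k+1) (by omega)]
    simp

-- Python str.find of '\\' returns the length of the backslash-free prefix, or -1
theorem pvFind_go_spec (l : List Char) : ∀ (k : Nat),
    PySem.Chars.find.go ['\\'] l k
      = if '\\' ∈ l then ((k : Int) + (l.takeWhile (· ≠ '\\')).length) else -1 := by
  induction l with
  | nil => intro k; simp [PySem.Chars.find.go]
  | cons c rest ih =>
    intro k
    by_cases hc : c = '\\'
    · subst hc
      simp [PySem.Chars.find.go, List.isPrefixOf]
    · rw [show PySem.Chars.find.go ['\\'] (c :: rest) k = PySem.Chars.find.go ['\\'] rest (k+1) by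
          simp [PySem.Chars.find.go, List.isPrefixOf, Ne.symm hc]]
      rw [ih (k+1)]
      by_cases hm : '\\' ∈ rest
      · rw [if_pos hm, if_pos (by simp [hm])]
        simp [hc]
        omega
      · rw [if_neg hm, if_neg (by simp [hm, Ne.symm hc])]

-- dropping the backslash-free prefix is dropWhile
theorem pvDrop_takeWhile_len (l : List Char) :
    l.drop (l.takeWhile (· ≠ '\\')).length = l.dropWhile (· ≠ '\\') := by
  have h := List.takeWhile_append_dropWhile (p := (· ≠ '\\')) (l := l)
  nth_rewrite 2 [← h]
  rw [List.drop_left]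

-- ===== VERDICT (by name: the statement is the Claim_ definition above) =====
theorem replace_first_directory_spec : Claim_equal_replace_first_directory := by
  intro path new_dir _
  simp only [Spec_replace_first_directory, replace_first_directory, replace_first_directory_alt]
  set l := path.toList with hl
  set d := new_dir.toList with hd
  -- evaluate A's loop
  have hA : (PySem.List.enumerate (PySem.Chars.splitOn l ['\\'])).foldl
      (fun np p => if p.1 = 0 then np ++ d else np ++ ('\\' :: p.2)) []
      = d ++ l.dropWhile (· ≠ '\\') := by
    rw [pvSplit_eq, pvSplit_head]
    rw [show PySem.List.enumerate (l.takeWhile (· ≠ '\\') :: (pvSplit l).tail) 0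
          = ((0 : Int), l.takeWhile (· ≠ '\\')) :: PySem.List.enumerate ((pvSplit l).tail) 1 by
        simp [PySem.List.enumerate]]
    simp only [List.foldl_cons, List.nil_append, if_true]
    rw [pvFold_tail d ((pvSplit l).tail) d 1 (by omega)]
    rw [pvSplit_tail_join]
  rw [hA]
  -- evaluate B's find
  have hfind : PySem.Str.find path "\\" = PySem.Chars.find.go ['\\'] l 0 := by
    simp [PySem.Str.find, PySem.Chars.find, hl]
  rw [hfind, pvFind_go_spec l 0]
  by_cases hm : '\\' ∈ l
  · rw [if_pos hm]
    have hk : ((((0:Nat)):Int) + ((l.takeWhile (· ≠ '\\')).length : Int))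
        = (((l.takeWhile (· ≠ '\\')).length : Nat) : Int) := by push_cast; ring
    rw [hk]
    rw [if_neg (by omega)]
    rw [PySem.List.slice_from_natCast]
    rw [pvDrop_takeWhile_len]
  · rw [if_neg hm, if_pos rfl]
    have hnil : l.dropWhile (· ≠ '\\') = [] := by
      rw [List.dropWhile_eq_nil_iff]
      intro x hx
      simp
      rintro rfl
      exact hm hx
    rw [hnil]
    simp [hd]
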